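-- pv_equiv track=rewrite | github.com/dev-baek/Algorithm | 14502.py | wall_combinations
-- ===== SOURCE A (Python) =====
-- from itertools import combinations
--
-- def wall_combinations(n, m, space):
--     empty_spot = []
--     wall_list = []
--     for i in range(n):
--         for j in range(m):
--             if space[i][j] == 0:
--                 empty_spot.append((i, j))
--     wall_list = list(combinations(empty_spot, 3))
--     return wall_list
-- ===== SOURCE B (Python) =====
-- def wall_combinations(n, m, space):
--     empty = [(i, j) for i, row in enumerate(space) if i < n
--                     for j, v in enumerate(row) if j < m and v == 0]
--     # DP over suffixes, built back-to-front: after processing cell x,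
--     # singles / pairs / triples are the 1-, 2-, 3-combinations of the
--     # suffix starting at x, each in lexicographic order.
--     singles, pairs, triples = [], [], []
--     for x in reversed(empty):
--         triples = [(x, a, b) for (a, b) in pairs] + triples
--         pairs = [(x, y) for y in singles] + pairs
--         singles = [x] + singles
--     return triples
-- ===== Notes on version B (the rewrite author's own statement) =====
-- stated objective: alternative
-- what changed: B replaces itertools.combinations by a dynamic program over suffixes built back-to-front: one reversed pass keeps the 1-, 2- and 3-combinations of the suffix seen so far as three accumulators, prepending the new cell's contributions, and the empty cells come from a filtered enumerate comprehension instead of index loops.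
import Mathlib
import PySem

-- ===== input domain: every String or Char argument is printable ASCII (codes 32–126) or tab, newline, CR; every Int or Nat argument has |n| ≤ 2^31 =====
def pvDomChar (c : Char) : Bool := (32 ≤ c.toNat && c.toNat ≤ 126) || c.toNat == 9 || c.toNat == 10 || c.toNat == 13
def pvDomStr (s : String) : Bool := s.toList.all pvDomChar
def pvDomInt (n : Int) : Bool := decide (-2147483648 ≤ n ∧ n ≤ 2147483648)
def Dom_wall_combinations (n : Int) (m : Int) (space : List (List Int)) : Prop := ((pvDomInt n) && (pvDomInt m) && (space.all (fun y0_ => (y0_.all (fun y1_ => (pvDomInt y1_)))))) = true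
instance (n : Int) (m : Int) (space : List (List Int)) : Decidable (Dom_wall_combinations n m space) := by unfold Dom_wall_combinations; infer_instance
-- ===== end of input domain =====

-- B replaces itertools.combinations by a suffix dynamic program built back-to-front (one reversed
-- pass with three accumulators for the 1-, 2- and 3-combinations of the suffix seen so far);
-- objective: alternative (same asymptotic cost).

-- ===== PORT A =====
-- helper modelling itertools.combinations(l, 2) (lexicographic by position)
def pyCombs2 {α : Type} (l : List α) : List (α × α) :=
  match l with
  | [] => []
  | x :: xs => xs.map (fun y => (x, y)) ++ pyCombs2 xs

-- helper modelling itertools.combinations(l, 3) (lexicographic by position)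
def pyCombs3 {α : Type} (l : List α) : List (α × α × α) :=
  match l with
  | [] => []
  | x :: xs => (pyCombs2 xs).map (fun p => (x, p.1, p.2)) ++ pyCombs3 xs

def wall_combinations (n : Int) (m : Int) (space : List (List Int)) : List ((Int × Int) × (Int × Int) × (Int × Int)) :=
  -- double loop over range(n) × range(m), appending (i, j) when space[i][j] == 0
  -- (pyGetD is exact under Pre_, which excludes the IndexError inputs)
  let empty_spot : List (Int × Int) :=
    (PySem.List.pyRange 0 n 1).foldl (fun acc i =>
      (PySem.List.pyRange 0 m 1).foldl (fun acc2 j =>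
        if PySem.List.pyGetD (PySem.List.pyGetD space i []) j 0 = 0 then acc2 ++ [(i, j)] else acc2) acc) []
  pyCombs3 empty_spot

-- ===== PORT B =====
def wall_combinations_alt (n : Int) (m : Int) (space : List (List Int)) : List ((Int × Int) × (Int × Int) × (Int × Int)) :=
  -- comprehension: enumerate rows/cells, keep (i, j) with i < n, j < m, v == 0
  let empty : List (Int × Int) :=
    (PySem.List.enumerate space 0).flatMap (fun p =>
      if p.1 < n then
        (PySem.List.enumerate p.2 0).filterMap (fun q =>
          if q.1 < m ∧ q.2 = 0 then some (p.1, q.1) else none)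
      else [])
  -- for x in reversed(empty): update (singles, pairs, triples) from the old state
  let st := empty.reverse.foldl
    (fun st (x : Int × Int) =>
      (x :: st.1,
       st.1.map (fun y => (x, y)) ++ st.2.1,
       st.2.1.map (fun p => (x, p.1, p.2)) ++ st.2.2))
    (([], [], []) : List (Int × Int) × List ((Int × Int) × (Int × Int)) × List ((Int × Int) × (Int × Int) × (Int × Int)))
  st.2.2

-- ===== PRECONDITION & SPEC =====
-- Pre_ excludes exactly the inputs where A raises IndexError: m > 0 together with either
-- n > len(space) or one of the first n rows shorter than m.
def Pre_wall_combinations (n : Int) (m : Int) (space : List (List Int)) : Prop :=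
  m ≤ 0 ∨ (n ≤ (space.length : Int) ∧ ∀ row ∈ space.take n.toNat, m ≤ (row.length : Int))
instance (n : Int) (m : Int) (space : List (List Int)) : Decidable (Pre_wall_combinations n m space) := by unfold Pre_wall_combinations; infer_instance

def pvWitness_wall_combinations : Int × Int × List (List Int) := (2, 2, [[0, 0], [0, 1]])

def Spec_wall_combinations (n : Int) (m : Int) (space : List (List Int)) (out : List ((Int × Int) × (Int × Int) × (Int × Int))) : Prop := out = wall_combinations_alt n m space
instance (n : Int) (m : Int) (space : List (List Int)) (out : List ((Int × Int) × (Int × Int) × (Int × Int))) : Decidable (Spec_wall_combinations n m space out) := by unfold Spec_wall_combinations; infer_instance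

-- ===== CLAIM (what is proved, stated in full; the proofs are below) =====
def Claim_equal_wall_combinations : Prop := ∀ (n : Int) (m : Int) (space : List (List Int)), Dom_wall_combinations n m space → Pre_wall_combinations n m space → Spec_wall_combinations n m space (wall_combinations n m space)

-- ===== LEMMAS AND PROOFS =====

-- generic loop-shape helpers (Prop-valued tests)
lemma foldl_append_if_prop {α β : Type} (p : α → Prop) [DecidablePred p] (f : α → β)
    (l : List α) (acc : List β) :
    l.foldl (fun acc x => if p x then acc ++ [f x] else acc) acc
      = acc ++ (l.filter (fun x => decide (p x))).map f := by
  induction l generalizing acc with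
  | nil => simp
  | cons x xs ih => by_cases h : p x <;> simp [h, ih]

lemma filterMap_if_eq {α β : Type} (p : α → Prop) [DecidablePred p] (f : α → β) (l : List α) :
    l.filterMap (fun x => if p x then some (f x) else none)
      = (l.filter (fun x => decide (p x))).map f := by
  induction l with
  | nil => simp
  | cons x xs ih => by_cases h : p x <;> simp [h, ih]

lemma filterMap_congr_mem {α β : Type} {l : List α} {f g : α → Option β}
    (h : ∀ x ∈ l, f x = g x) : l.filterMap f = l.filterMap g := by
  induction l with
  | nil => simp
  | cons x xs ih =>
    simp only [List.filterMap_cons]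
    rw [h x (by simp), ih (fun y hy => h y (by simp [hy]))]

lemma flatMap_congr_mem {α β : Type} {l : List α} {f g : α → List β}
    (h : ∀ x ∈ l, f x = g x) : l.flatMap f = l.flatMap g := by
  induction l with
  | nil => simp
  | cons x xs ih =>
    simp only [List.flatMap_cons]
    rw [h x (by simp), ih (fun y hy => h y (by simp [hy]))]

lemma getD_at {α : Type} (es : List α) (d : α) (k : Nat) (hk : k < es.length) :
    PySem.List.pyGetD es (k : Int) d = es[k] := by
  simp [PySem.List.pyGetD_natCast, List.getD_eq_getElem?_getD, hk]

-- the suffix DP of B computes exactly (singles, 2-combinations, 3-combinations)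
lemma suffix_dp_eq (es : List (Int × Int)) :
    es.reverse.foldl
      (fun st (x : Int × Int) =>
        (x :: st.1,
         st.1.map (fun y => (x, y)) ++ st.2.1,
         st.2.1.map (fun p => (x, p.1, p.2)) ++ st.2.2))
      (([], [], []) : List (Int × Int) × List ((Int × Int) × (Int × Int)) × List ((Int × Int) × (Int × Int) × (Int × Int)))
      = (es, pyCombs2 es, pyCombs3 es) := by
  rw [List.foldl_reverse]
  induction es with
  | nil => simp [pyCombs2, pyCombs3]
  | cons x xs ih => simp [List.foldr_cons, ih, pyCombs2, pyCombs3]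

lemma row_eq (row : List Int) (i m : Int) (hm : m ≤ 0 ∨ m ≤ (row.length : Int)) :
    (PySem.List.enumerate row 0).filterMap (fun q =>
        if q.1 < m ∧ q.2 = 0 then some (i, q.1) else none)
      = ((PySem.List.pyRange 0 m 1).filter
            (fun j => decide (PySem.List.pyGetD row j 0 = 0))).map (fun j => (i, j)) := by
  rw [PySem.List.enumerate_eq_map_pyRange row 0, List.filterMap_map]
  by_cases h0 : m ≤ 0
  · rw [PySem.List.pyRange_one_eq_nil h0]
    simp only [List.filter_nil, List.map_nil]
    rw [List.filterMap_eq_nil_iff]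
    intro j hj
    have := PySem.List.mem_pyRange_one.mp hj
    have hjm : ¬ (j < m) := by
      have hlen : PySem.List.len row = (row.length : Int) := by simp [PySem.List.len]
      omega
    simp [Function.comp, hjm]
  · have hm' : m ≤ (row.length : Int) := by omega
    have hlen : PySem.List.len row = (row.length : Int) := by simp [PySem.List.len]
    rw [hlen, PySem.List.pyRange_one_append 0 m (row.length : Int) (by omega) hm',
      List.filterMap_append]
    have h2 : (PySem.List.pyRange m (row.length : Int)).filterMap
        ((fun q : Int × Int => if q.1 < m ∧ q.2 = 0 then some (i, q.1) else none) ∘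
          (fun j => (j, PySem.List.pyGetD row j 0))) = [] := by
      rw [List.filterMap_eq_nil_iff]
      intro j hj
      have := PySem.List.mem_pyRange_one.mp hj
      have hjm : ¬ (j < m) := by omega
      simp [Function.comp, hjm]
    rw [h2, List.append_nil]
    rw [filterMap_congr_mem (g := fun j => if PySem.List.pyGetD row j 0 = 0 then some (i, j) else none)
      (fun j hj => by
        have := PySem.List.mem_pyRange_one.mp hj
        have hjm : j < m := this.2
        simp [Function.comp, hjm])]
    exact filterMap_if_eq _ _ _

lemma empty_eq (n m : Int) (space : List (List Int))
    (hp : m ≤ 0 ∨ (n ≤ (space.length : Int) ∧ ∀ row ∈ space.take n.toNat, m ≤ (row.length : Int))) :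
    (PySem.List.enumerate space 0).flatMap (fun p =>
        if p.1 < n then
          (PySem.List.enumerate p.2 0).filterMap (fun q =>
            if q.1 < m ∧ q.2 = 0 then some (p.1, q.1) else none)
        else [])
      = (PySem.List.pyRange 0 n 1).foldl (fun acc i =>
          (PySem.List.pyRange 0 m 1).foldl (fun acc2 j =>
            if PySem.List.pyGetD (PySem.List.pyGetD space i []) j 0 = 0 then acc2 ++ [(i, j)] else acc2) acc) [] := by
  have hA : (PySem.List.pyRange 0 n 1).foldl (fun acc i =>
          (PySem.List.pyRange 0 m 1).foldl (fun acc2 j =>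
            if PySem.List.pyGetD (PySem.List.pyGetD space i []) j 0 = 0 then acc2 ++ [(i, j)] else acc2) acc) []
      = (PySem.List.pyRange 0 n 1).flatMap (fun i =>
          ((PySem.List.pyRange 0 m 1).filter
            (fun j => decide (PySem.List.pyGetD (PySem.List.pyGetD space i []) j 0 = 0))).map (fun j => (i, j))) := by
    simp only [foldl_append_if_prop, PySem.List.foldl_append_eq_flatMap]
    simp
  have hslen : PySem.List.len space = (space.length : Int) := by simp [PySem.List.len]
  rw [hA, PySem.List.enumerate_eq_map_pyRange space [], List.flatMap_map, hslen]
  dsimp only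
  have hrow : ∀ i ∈ PySem.List.pyRange (0:Int) n 1,
      (if i < n then
        (PySem.List.enumerate (PySem.List.pyGetD space i []) 0).filterMap (fun q =>
          if q.1 < m ∧ q.2 = 0 then some (i, q.1) else none)
      else [])
      = ((PySem.List.pyRange 0 m 1).filter
            (fun j => decide (PySem.List.pyGetD (PySem.List.pyGetD space i []) j 0 = 0))).map
          (fun j => (i, j)) := by
    intro i hi
    have hib := PySem.List.mem_pyRange_one.mp hi
    rw [if_pos hib.2]
    apply row_eq
    rcases hp with hm0 | ⟨hnlen, hrows⟩
    · exact Or.inl hm0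
    · right
      have hilt : i.toNat < space.length := by omega
      have hieq : (i.toNat : Int) = i := Int.toNat_of_nonneg hib.1
      have hrow_get : PySem.List.pyGetD space i [] = space[i.toNat] := by
        have hg := getD_at space ([] : List Int) i.toNat hilt
        rwa [hieq] at hg
      rw [hrow_get]
      apply hrows
      have hlt : i.toNat < (space.take n.toNat).length := by
        simp [List.length_take]; omega
      have hte : (space.take n.toNat)[i.toNat] = space[i.toNat] := List.getElem_take
      rw [← hte]
      exact List.getElem_mem hlt
  by_cases hm0 : m ≤ 0
  · rw [List.flatMap_eq_nil_iff.mpr (fun i hi => by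
      by_cases hin : i < n
      · rw [if_pos hin, row_eq _ _ _ (Or.inl hm0), PySem.List.pyRange_one_eq_nil hm0]
        simp
      · rw [if_neg hin])]
    rw [Eq.comm, List.flatMap_eq_nil_iff]
    intro i hi
    rw [PySem.List.pyRange_one_eq_nil hm0]
    simp
  by_cases hn : n ≤ 0
  · rw [PySem.List.pyRange_one_eq_nil hn]
    simp only [List.flatMap_nil]
    rw [List.flatMap_eq_nil_iff]
    intro i hi
    have hib := PySem.List.mem_pyRange_one.mp hi
    have hni : ¬ (i < n) := by omega
    rw [if_neg hni]
  · have hnlen : n ≤ (space.length : Int) := by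
      rcases hp with hm0 | ⟨hnlen, _⟩
      · exact absurd hm0 (by omega)
      · exact hnlen
    rw [PySem.List.pyRange_one_append 0 n (space.length : Int) (by omega) hnlen,
      List.flatMap_append]
    have h2 : (PySem.List.pyRange n (space.length : Int)).flatMap
        (fun i =>
          if i < n then
            (PySem.List.enumerate (PySem.List.pyGetD space i []) 0).filterMap (fun q =>
              if q.1 < m ∧ q.2 = 0 then some (i, q.1) else none)
          else []) = [] := by
      rw [List.flatMap_eq_nil_iff]
      intro i hi
      have hib := PySem.List.mem_pyRange_one.mp hi
      have hni : ¬ (i < n) := by omega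
      rw [if_neg hni]
    rw [h2, List.append_nil]
    exact flatMap_congr_mem hrow

-- ===== VERDICT (by name: the statement is the Claim_ definition above) =====
theorem wall_combinations_spec : Claim_equal_wall_combinations := by
  intro n m space _ hp
  unfold Spec_wall_combinations wall_combinations wall_combinations_alt
  simp only [suffix_dp_eq]
  rw [empty_eq n m space hp]
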